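-- pv_equiv track=rewrite | github.com/thealper2/codewars-solutions | 7-kyu/zero_balanced_array.py | is_zero_balanced
-- ===== SOURCE A (Python) =====
-- def is_zero_balanced(arr):
--     if not arr:
--         return False
--
--     s = 0
--     for item in arr:
--         if -item in arr:
--             s += item
--         else:
--             return False
--
--     return s == 0
-- ===== SOURCE B (Python) =====
-- def is_zero_balanced(arr):
--     if not arr:
--         return False
--     v = sorted(set(arr))
--     if any(x != -y for x, y in zip(v, reversed(v))):
--         return False
--     total = 0
--     for x in arr:
--         total += x
--     return total == 0
-- ===== Notes on version B (the rewrite author's own statement) =====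
-- stated objective: alternative
-- what changed: Replaces A's per-element linear membership scans with an interleaved sum by a sort-based algorithm: sort the distinct elements and check that the sorted list is the element-wise negation of its own reverse (zip with reversed), then sum the list in a separate pass; correctness rests on the fact that a finite set is closed under negation iff negation reverses its sorted order.
import Mathlib
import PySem

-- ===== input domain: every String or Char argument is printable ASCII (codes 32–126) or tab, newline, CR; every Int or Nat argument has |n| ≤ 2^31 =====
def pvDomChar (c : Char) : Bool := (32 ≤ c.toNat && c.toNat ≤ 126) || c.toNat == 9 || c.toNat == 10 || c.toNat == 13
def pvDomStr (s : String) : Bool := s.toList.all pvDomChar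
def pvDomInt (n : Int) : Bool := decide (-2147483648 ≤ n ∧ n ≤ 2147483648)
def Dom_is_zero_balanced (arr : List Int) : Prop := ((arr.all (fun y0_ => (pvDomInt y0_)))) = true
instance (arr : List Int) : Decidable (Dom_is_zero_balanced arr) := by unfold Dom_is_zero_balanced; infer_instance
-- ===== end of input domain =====

-- B sorts the distinct elements and checks that the sorted list equals the negation of its own
-- reverse (closure under negation = palindromic sorted order), then sums in a separate pass —
-- instead of A's per-element membership scan with an interleaved sum.

-- ===== PORT A =====
-- the for-loop: remaining items, accumulator s; `-item in arr` scans the full list; early return False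
def izbLoop (full : List Int) : List Int → Int → Bool
  | [], s => s == 0
  | x :: xs, s => if full.contains (-x) then izbLoop full xs (s + x) else false

def is_zero_balanced (arr : List Int) : Bool :=
  if arr.isEmpty then false else izbLoop arr arr 0

-- ===== PORT B =====
def is_zero_balanced_alt (arr : List Int) : Bool :=
  if arr.isEmpty then false
  else
    let v := PySem.List.sorted (PySem.Set.ofList arr) (fun x => x) false
    if (v.zip v.reverse).any (fun p => p.1 != -p.2) then false
    else (arr.foldl (· + ·) 0) == 0

-- ===== PRECONDITION & SPEC =====
def Spec_is_zero_balanced (arr : List Int) (out : Bool) : Prop := out = is_zero_balanced_alt arr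
instance (arr : List Int) (out : Bool) : Decidable (Spec_is_zero_balanced arr out) := by unfold Spec_is_zero_balanced; infer_instance

-- ===== CLAIM (what is proved, stated in full; the proofs are below) =====
def Claim_equal_is_zero_balanced : Prop := ∀ (arr : List Int), Dom_is_zero_balanced arr → Spec_is_zero_balanced arr (is_zero_balanced arr)

-- ===== LEMMAS AND PROOFS =====

-- A's loop = (every element's negation occurs in `full`) and (acc + sum = 0)
theorem izbLoop_eq (full xs : List Int) (s : Int) :
    izbLoop full xs s = (xs.all (fun x => full.contains (-x)) && decide (s + xs.sum = 0)) := by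
  induction xs generalizing s with
  | nil =>
    simp only [izbLoop, List.all_nil, List.sum_nil, Bool.true_and, add_zero]
    rfl
  | cons x xs ih =>
    simp only [izbLoop, List.all_cons, List.sum_cons]
    by_cases h : full.contains (-x)
    · rw [if_pos h, ih, h]
      simp only [Bool.true_and, add_assoc]
      rfl
    · rw [if_neg h]
      simp only [List.contains_iff_mem] at h
      simp [h]

-- the zip-with-reverse check says exactly: v is the element-wise negation of its reverse
theorem zip_neg_eq_iff (l₁ l₂ : List Int) (h : l₁.length = l₂.length) :
    ((l₁.zip l₂).all (fun p => p.1 == -p.2) = true) ↔ l₁ = l₂.map Neg.neg := by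
  induction l₁ generalizing l₂ with
  | nil =>
    cases l₂ with
    | nil => simp
    | cons y ys => simp at h
  | cons x xs ih =>
    cases l₂ with
    | nil => simp at h
    | cons y ys =>
      simp only [List.length_cons, Nat.add_right_cancel_iff] at h
      simp [List.zip_cons_cons, ih ys h, and_comm]

-- for a strictly increasing list, palindromic negation ↔ membership closed under negation
theorem pal_iff_closed (v : List Int) (hp : v.Pairwise (· < ·)) :
    v = (v.reverse.map Neg.neg) ↔ ∀ x ∈ v, -x ∈ v := by
  constructor
  · intro he x hx
    rw [he] at hx
    simp only [List.mem_map, List.mem_reverse] at hx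
    obtain ⟨y, hy, hxy⟩ := hx
    have : -x = y := by omega
    rw [this]; exact hy
  · intro hc
    have hnd : v.Nodup := hp.imp ne_of_lt
    have hnd2 : (v.reverse.map Neg.neg).Nodup := by
      refine (List.nodup_reverse.mpr hnd).map ?_
      intro a b hab; omega
    have hmem : ∀ x : Int, x ∈ v ↔ x ∈ v.reverse.map Neg.neg := by
      intro x
      simp only [List.mem_map, List.mem_reverse]
      constructor
      · intro hx; exact ⟨-x, hc x hx, by omega⟩
      · rintro ⟨y, hy, rfl⟩; exact hc y hy
    have hperm : v.Perm (v.reverse.map Neg.neg) :=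
      (List.perm_ext_iff_of_nodup hnd hnd2).mpr hmem
    have hp2 : (v.reverse.map Neg.neg).Pairwise (· < ·) := by
      rw [List.pairwise_map, List.pairwise_reverse]
      exact hp.imp (by intro a b hab; omega)
    exact hperm.eq_of_pairwise (by intro a b _ _ ha hb; omega) hp hp2

-- any(x != -y) is the negation of all(x == -y)
theorem any_bne_eq_not_all (l : List (Int × Int)) :
    (l.any fun p => p.1 != -p.2) = !(l.all fun p => p.1 == -p.2) := by
  induction l with
  | nil => rfl
  | cons a t ih =>
    rw [List.any_cons, List.all_cons, ih, Bool.not_and, bne]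

-- ===== VERDICT (by name: the statement is the Claim_ definition above) =====
theorem is_zero_balanced_spec : Claim_equal_is_zero_balanced := by
  intro arr _
  unfold Spec_is_zero_balanced is_zero_balanced is_zero_balanced_alt
  by_cases he : arr.isEmpty
  · simp [he]
  · simp only [if_neg he, izbLoop_eq]
    set v := PySem.List.sorted (PySem.Set.ofList arr) (fun x => x) false with hv
    have hp : v.Pairwise (· < ·) := PySem.List.sorted_ofList_pairwise_lt arr
    have hmemv : ∀ x : Int, x ∈ v ↔ x ∈ arr := by
      intro x
      rw [hv, PySem.List.mem_sorted, PySem.Set.mem_ofList]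
    have hlen : v.length = v.reverse.length := by simp
    have hclos : ((v.zip v.reverse).all fun p => p.1 == -p.2) =
        (arr.all fun x => arr.contains (-x)) := by
      rcases Bool.eq_false_or_eq_true ((v.zip v.reverse).all fun p => p.1 == -p.2) with hz | hz <;>
        rcases Bool.eq_false_or_eq_true (arr.all fun x => arr.contains (-x)) with ha | ha <;>
        rw [hz, ha]
      · -- zip check true but closure false: contradiction
        exfalso
        have hcl : ∀ x ∈ v, -x ∈ v :=
          (pal_iff_closed v hp).mp ((zip_neg_eq_iff v v.reverse hlen).mp hz)
        have hc2 : (arr.all fun x => arr.contains (-x)) = true := by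
          rw [List.all_eq_true]
          intro x hx
          rw [List.contains_iff_mem]
          exact (hmemv (-x)).mp (hcl x ((hmemv x).mpr hx))
        rw [ha] at hc2; exact Bool.false_ne_true hc2
      · -- zip check false but closure true: contradiction
        exfalso
        have hcl : ∀ x ∈ v, -x ∈ v := by
          intro x hx
          rw [List.all_eq_true] at ha
          have hm := ha x ((hmemv x).mp hx)
          rw [List.contains_iff_mem] at hm
          exact (hmemv (-x)).mpr hm
        have hc2 : ((v.zip v.reverse).all fun p => p.1 == -p.2) = true :=
          (zip_neg_eq_iff v v.reverse hlen).mpr ((pal_iff_closed v hp).mpr hcl)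
        rw [hz] at hc2; exact Bool.false_ne_true hc2
    rw [any_bne_eq_not_all, hclos]
    rcases Bool.eq_false_or_eq_true (arr.all fun x => arr.contains (-x)) with ha | ha <;> rw [ha]
    · simp only [← List.sum_eq_foldl]
      cases h0 : (arr.sum == 0) <;> simp_all
    · simp
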